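-- pv_equiv track=rewrite | github.com/MrGmo/codeWars-Python | 7kyu/bits-battle.py | bits_battle
-- ===== SOURCE A (Python) =====
-- def bits_battle(numbers):
--     odds = []
--     evens = []
--     for num in numbers:
--         if num % 2 == 0:
--             evens.append(num)
--         else:
--             odds.append(num)
--     ones = "".join(bin(x)[2:] for x in odds).count("1")
--     zeros = "".join(bin(x)[2:] for x in evens).count("0")
--     if ones > zeros:
--         return "odds win"
--     if ones < zeros:
--         return "evens win"
--     return "tie"
-- ===== SOURCE B (Python) =====
-- def bits_battle(numbers):
--     ones = 0
--     zeros = 0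
--     for num in numbers:
--         if num % 2:
--             ones += num.bit_count()
--         else:
--             zeros += max(num.bit_length(), 1) - num.bit_count()
--     if ones > zeros:
--         return "odds win"
--     if ones < zeros:
--         return "evens win"
--     return "tie"
-- ===== Notes on version B (the rewrite author's own statement) =====
-- stated objective: simpler
-- what changed: Replaced the partition-into-two-lists + joined-binary-string + substring-count pipeline with one fused pass keeping two integer accumulators, using int.bit_count()/bit_length() instead of building strings.
import Mathlib
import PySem

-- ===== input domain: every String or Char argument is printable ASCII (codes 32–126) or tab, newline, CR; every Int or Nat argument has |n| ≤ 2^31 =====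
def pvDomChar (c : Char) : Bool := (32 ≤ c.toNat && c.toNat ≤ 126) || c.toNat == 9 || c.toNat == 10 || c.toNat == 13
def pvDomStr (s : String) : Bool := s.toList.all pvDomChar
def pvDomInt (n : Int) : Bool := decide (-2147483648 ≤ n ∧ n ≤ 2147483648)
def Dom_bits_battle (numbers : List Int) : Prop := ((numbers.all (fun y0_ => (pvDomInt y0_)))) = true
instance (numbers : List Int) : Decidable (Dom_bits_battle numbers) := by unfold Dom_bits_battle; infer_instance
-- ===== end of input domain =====

-- B fuses A's partition-then-count-in-joined-binary-strings pipeline into one pass with two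
-- integer accumulators using int.bit_count()/bit_length(); same return value, no intermediate lists/strings.


-- ===== PORT A =====
-- bin(x)[2:] : PySem.Int.toBinChars0b is bin(x); drop 2 is the slice [2:] (exact on lists of chars)
def pvBinTail (x : Int) : List Char := (PySem.Int.toBinChars0b x).drop 2

def bits_battle (numbers : List Int) : String :=
  -- the partition loop: odds/evens built by appending
  let p := numbers.foldl
    (fun (p : List Int × List Int) num =>
      if PySem.Int.mod num 2 = 0 then (p.1, p.2 ++ [num]) else (p.1 ++ [num], p.2))
    ([], [])
  -- "".join(bin(x)[2:] for x in odds).count("1") : count '1' in the concatenation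
  let ones := (p.1.flatMap pvBinTail).count '1'
  let zeros := (p.2.flatMap pvBinTail).count '0'
  if ones > zeros then "odds win"
  else if ones < zeros then "evens win"
  else "tie"

-- ===== PORT B =====
def bits_battle_alt (numbers : List Int) : String :=
  let q := numbers.foldl
    (fun (q : Nat × Nat) num =>
      if PySem.Int.mod num 2 ≠ 0 then (q.1 + PySem.Int.bitCount num, q.2)
      else (q.1, q.2 + (max (PySem.Int.bitLength num) 1 - PySem.Int.bitCount num)))
    (0, 0)
  if q.1 > q.2 then "odds win"
  else if q.1 < q.2 then "evens win"
  else "tie"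

-- ===== PRECONDITION & SPEC =====
def Spec_bits_battle (numbers : List Int) (out : String) : Prop := out = bits_battle_alt numbers
instance (numbers : List Int) (out : String) : Decidable (Spec_bits_battle numbers out) := by unfold Spec_bits_battle; infer_instance

-- ===== CLAIM (what is proved, stated in full; the proofs are below) =====
def Claim_equal_bits_battle : Prop := ∀ (numbers : List Int), Dom_bits_battle numbers → Spec_bits_battle numbers (bits_battle numbers)

-- ===== LEMMAS AND PROOFS =====

-- MSB-first binary digits of n (empty for 0): the shape of Nat.toDigits 2 for positive n
def pvBits : Nat → List Char
  | 0 => []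
  | n+1 => pvBits ((n+1)/2) ++ [if (n+1) % 2 = 1 then '1' else '0']
decreasing_by exact Nat.div_lt_self (Nat.succ_pos n) (by omega)

lemma toDigitsCore_eq_pvBits : ∀ (f n : Nat) (acc : List Char), 0 < n → n < f →
    Nat.toDigitsCore 2 f n acc = pvBits n ++ acc := by
  intro f
  induction f with
  | zero => intro n acc h1 h2; omega
  | succ f ih =>
    intro n acc h1 h2
    rw [Nat.toDigitsCore]
    by_cases h : n / 2 = 0
    · have hn1 : n = 1 := by omega
      subst hn1
      simp [pvBits, Nat.digitChar]
    · rw [if_neg h, ih (n/2) _ (by omega) (by omega)]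
      have hx : pvBits n = pvBits (n/2) ++ [if n % 2 = 1 then '1' else '0'] := by
        cases n with
        | zero => omega
        | succ m => rw [pvBits]
      rw [hx, List.append_assoc]
      congr 1
      have h2 : n % 2 = 0 ∨ n % 2 = 1 := by omega
      rcases h2 with h2 | h2 <;> simp only [h2, Nat.digitChar] <;> rfl

lemma toDigits_eq_pvBits (n : Nat) (h : 0 < n) : Nat.toDigits 2 n = pvBits n :=
  by rw [Nat.toDigits, toDigitsCore_eq_pvBits (n+1) n [] h (by omega)]; simp

lemma pvBits_count1 (n : Nat) : (pvBits n).count '1' = PySem.Int.bitCount (n : Int) := by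
  induction n using Nat.strong_induction_on with
  | _ n ih =>
    cases n with
    | zero => simp [pvBits, PySem.Int.bitCount_zero]
    | succ m =>
      rw [pvBits, List.count_append,
          PySem.Int.bitCount_natCast (m := m+1) (by omega),
          ih ((m+1)/2) (by omega)]
      have h2 : (m+1) % 2 = 0 ∨ (m+1) % 2 = 1 := by omega
      rcases h2 with h2 | h2 <;> simp [h2] <;> omega

lemma pvBits_len (n : Nat) : (pvBits n).length = PySem.Int.bitLength (n : Int) := by
  induction n using Nat.strong_induction_on with
  | _ n ih =>
    cases n with
    | zero => simp [pvBits, PySem.Int.bitLength_zero]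
    | succ m =>
      rw [pvBits, List.length_append,
          PySem.Int.bitLength_natCast (m := m+1) (by omega),
          ih ((m+1)/2) (by omega)]
      simp

lemma pvBits_count0 (n : Nat) :
    (pvBits n).count '0' + (pvBits n).count '1' = (pvBits n).length := by
  induction n using Nat.strong_induction_on with
  | _ n ih =>
    cases n with
    | zero => simp [pvBits]
    | succ m =>
      rw [pvBits]
      simp only [List.count_append, List.length_append]
      have h := ih ((m+1)/2) (by omega)
      have h2 : (m+1) % 2 = 0 ∨ (m+1) % 2 = 1 := by omega
      rcases h2 with h2 | h2 <;> simp [h2] <;> omega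

lemma pvBinTail_eq (x : Int) :
    pvBinTail x = (if x < 0 then ['b'] else []) ++ (if x.natAbs = 0 then ['0'] else pvBits x.natAbs) := by
  unfold pvBinTail PySem.Int.toBinChars0b
  by_cases h : x < 0
  · have h0 : x.natAbs ≠ 0 := by omega
    simp only [if_pos h, if_neg h0, toDigits_eq_pvBits x.natAbs (by omega), List.drop]
    rfl
  · by_cases h0 : x.natAbs = 0
    · have hx : x = 0 := by omega
      subst hx
      simp only [if_neg h, if_pos h0, Int.toNat_zero, List.drop]
      rfl
    · have ht : x.toNat = x.natAbs := by omega
      simp only [if_neg h, if_neg h0, ht,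
        toDigits_eq_pvBits x.natAbs (by omega), List.drop, List.nil_append]

lemma bitCount_natAbs (x : Int) : PySem.Int.bitCount x = PySem.Int.bitCount (x.natAbs : Int) := by
  rcases Int.natAbs_eq x with h | h
  · conv_lhs => rw [h]
  · conv_lhs => rw [h]
    exact PySem.Int.bitCount_neg _

lemma bitLength_natAbs (x : Int) : PySem.Int.bitLength x = PySem.Int.bitLength (x.natAbs : Int) := by
  rcases Int.natAbs_eq x with h | h
  · conv_lhs => rw [h]
  · conv_lhs => rw [h]
    exact PySem.Int.bitLength_neg _

lemma pvBinTail_count1 (x : Int) : (pvBinTail x).count '1' = PySem.Int.bitCount x := by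
  rw [pvBinTail_eq, bitCount_natAbs, List.count_append]
  have hb : List.count '1' (if x < 0 then ['b'] else []) = 0 := by
    split <;> rfl
  rw [hb, Nat.zero_add]
  by_cases h0 : x.natAbs = 0
  · rw [if_pos h0, h0]
    simp [PySem.Int.bitCount_zero]
  · rw [if_neg h0, pvBits_count1]

lemma pvBinTail_count0 (x : Int) :
    (pvBinTail x).count '0' = max (PySem.Int.bitLength x) 1 - PySem.Int.bitCount x := by
  rw [pvBinTail_eq, bitCount_natAbs, bitLength_natAbs, List.count_append]
  have hb : List.count '0' (if x < 0 then ['b'] else []) = 0 := by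
    split <;> rfl
  rw [hb, Nat.zero_add]
  by_cases h0 : x.natAbs = 0
  · rw [if_pos h0, h0]
    simp [PySem.Int.bitCount_zero, PySem.Int.bitLength_zero]
  · rw [if_neg h0]
    have key := pvBits_count0 x.natAbs
    rw [pvBits_count1, pvBits_len] at key
    have hlen : 1 ≤ PySem.Int.bitLength ((x.natAbs : Nat) : Int) := by
      rw [← pvBits_len]
      have hne : pvBits x.natAbs ≠ [] := by
        cases hx : x.natAbs with
        | zero => exact absurd hx h0
        | succ m => rw [pvBits]; simp
      have := List.length_pos_iff.mpr hne
      omega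
    omega

-- closed forms of the two folds
lemma foldA (l : List Int) (o e : List Int) :
    l.foldl (fun (p : List Int × List Int) num =>
      if PySem.Int.mod num 2 = 0 then (p.1, p.2 ++ [num]) else (p.1 ++ [num], p.2)) (o, e)
    = (o ++ l.filter (fun n => !decide (PySem.Int.mod n 2 = 0)),
       e ++ l.filter (fun n => decide (PySem.Int.mod n 2 = 0))) := by
  induction l generalizing o e with
  | nil => simp
  | cons x xs ih =>
    rw [List.foldl_cons]
    by_cases h : PySem.Int.mod x 2 = 0
    · rw [if_pos h, ih, List.filter_cons, List.filter_cons]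
      rw [PySem.Int.mod_eq_zero_iff_dvd] at h
      simp [h, List.append_assoc]
    · rw [if_neg h, ih, List.filter_cons, List.filter_cons]
      rw [PySem.Int.mod_eq_zero_iff_dvd] at h
      simp [h, List.append_assoc]

lemma foldB (l : List Int) (a b : Nat) :
    l.foldl (fun (q : Nat × Nat) num =>
      if PySem.Int.mod num 2 ≠ 0 then (q.1 + PySem.Int.bitCount num, q.2)
      else (q.1, q.2 + (max (PySem.Int.bitLength num) 1 - PySem.Int.bitCount num))) (a, b)
    = (a + ((l.filter (fun n => !decide (PySem.Int.mod n 2 = 0))).map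
              (fun n => PySem.Int.bitCount n)).sum,
       b + ((l.filter (fun n => decide (PySem.Int.mod n 2 = 0))).map
              (fun n => max (PySem.Int.bitLength n) 1 - PySem.Int.bitCount n)).sum) := by
  induction l generalizing a b with
  | nil => simp
  | cons x xs ih =>
    rw [List.foldl_cons]
    by_cases h : PySem.Int.mod x 2 = 0
    · rw [if_neg (by simpa using h), ih, List.filter_cons, List.filter_cons]
      rw [PySem.Int.mod_eq_zero_iff_dvd] at h
      simp [h, Prod.ext_iff]
      omega
    · rw [if_pos (by simpa using h), ih, List.filter_cons, List.filter_cons]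
      rw [PySem.Int.mod_eq_zero_iff_dvd] at h
      simp [h, Prod.ext_iff]
      omega

lemma count_flatMap_eq (c : Char) (f : Int → List Char) (l : List Int) :
    (l.flatMap f).count c = (l.map (fun x => (f x).count c)).sum := by
  induction l with
  | nil => simp
  | cons x xs ih => simp [List.flatMap_cons, List.count_append, ih]

-- ===== VERDICT (by name: the statement is the Claim_ definition above) =====
theorem bits_battle_spec : Claim_equal_bits_battle := by
  intro numbers _
  unfold Spec_bits_battle bits_battle bits_battle_alt
  rw [foldA, foldB]
  simp only [List.nil_append, Nat.zero_add, count_flatMap_eq]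
  have h1 : ((numbers.filter (fun n => !decide (PySem.Int.mod n 2 = 0))).map
      (fun x => (pvBinTail x).count '1')) =
      ((numbers.filter (fun n => !decide (PySem.Int.mod n 2 = 0))).map
      (fun n => PySem.Int.bitCount n)) := by
    apply List.map_congr_left; intro x _; exact pvBinTail_count1 x
  have h0 : ((numbers.filter (fun n => decide (PySem.Int.mod n 2 = 0))).map
      (fun x => (pvBinTail x).count '0')) =
      ((numbers.filter (fun n => decide (PySem.Int.mod n 2 = 0))).map
      (fun n => max (PySem.Int.bitLength n) 1 - PySem.Int.bitCount n)) := by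
    apply List.map_congr_left; intro x _; exact pvBinTail_count0 x
  rw [h1, h0]
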